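-- pv_equiv track=rewrite | github.com/ihucos/counter.dev | loop.py | nodouble
-- ===== SOURCE A (Python) =====
-- def nodouble(words, ignore="o"):
--     for word in words:
--         last = None
--         bad = False
--         for char in word:
--             if last == char and char not in ignore:
--                 bad = True
--                 break
--             last = char
--         if not bad:
--             yield word
-- ===== SOURCE B (Python) =====
-- def nodouble(words, ignore="o"):
--     # Run-length traversal: collapse each word into maximal runs of one
--     # character; a word passes iff every run is length 1 or its character
--     # is in `ignore`.
--     def runs(w):
--         out = []
--         i = 0
--         n = len(w)
--         while i < n:
--             j = i
--             while j < n and w[j] == w[i]: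
--                 j += 1
--             out.append((w[i], j - i))
--             i = j
--         return out
--
--     for word in words:
--         if all(n == 1 or c in ignore for c, n in runs(word)):
--             yield word
-- ===== Notes on version B (the rewrite author's own statement) =====
-- stated objective: alternative
-- what changed: Replaced the stateful previous-char/flag/break scan by a run-length encoding pass: each word is decomposed into maximal runs of identical characters and accepted iff every run has length 1 or its character is in ignore.
import Mathlib
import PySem

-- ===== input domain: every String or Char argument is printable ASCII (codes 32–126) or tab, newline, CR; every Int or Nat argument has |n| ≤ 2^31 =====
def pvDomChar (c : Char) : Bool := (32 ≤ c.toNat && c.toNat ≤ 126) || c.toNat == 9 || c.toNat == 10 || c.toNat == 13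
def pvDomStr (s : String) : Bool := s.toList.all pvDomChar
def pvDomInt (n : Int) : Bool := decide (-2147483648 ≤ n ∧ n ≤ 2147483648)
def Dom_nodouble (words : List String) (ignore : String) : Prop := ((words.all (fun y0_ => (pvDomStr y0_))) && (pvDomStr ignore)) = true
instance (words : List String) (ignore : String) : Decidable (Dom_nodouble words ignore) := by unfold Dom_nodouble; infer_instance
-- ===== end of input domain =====

-- B replaces A's stateful previous-char/flag/break scan by a run-length decomposition:
-- a word passes iff every maximal run of equal characters has length 1 or its character is in ignore.
-- Same values everywhere; no speed claim.

-- ===== PORT A =====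
-- inner loop state: (last, bad); once bad is set the Python loop breaks, modelled by leaving the state unchanged
def nodoubleStep (ignore : List Char) (st : Option Char × Bool) (c : Char) : Option Char × Bool :=
  if st.2 then st
  else if st.1 == some c && !ignore.contains c then (st.1, true)
  else (some c, false)

def nodouble (words : List String) (ignore : String) : List String :=
  words.foldl (fun acc w =>
    let st := w.toList.foldl (nodoubleStep ignore.toList) (none, false)
    if !st.2 then acc ++ [w] else acc) []

-- ===== PORT B =====
-- the inner while loop of Source B's runs(): scan the maximal prefix equal to the head char
def runsOf (l : List Char) : List (Char × Nat) :=
  match l with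
  | [] => []
  | c :: cs =>
      (c, 1 + (cs.takeWhile (fun d => d == c)).length) :: runsOf (cs.dropWhile (fun d => d == c))
termination_by l.length
decreasing_by
  simpa using Nat.lt_succ_of_le (List.length_dropWhile_le _ _)

-- all(n == 1 or c in ignore for c, n in runs(word))
def goodWord (ignore : List Char) (l : List Char) : Bool :=
  (runsOf l).all (fun p => p.2 == 1 || ignore.contains p.1)

def nodouble_alt (words : List String) (ignore : String) : List String :=
  words.filter (fun w => goodWord ignore.toList w.toList)

-- ===== PRECONDITION & SPEC =====
def Spec_nodouble (words : List String) (ignore : String) (out : List String) : Prop := out = nodouble_alt words ignore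
instance (words : List String) (ignore : String) (out : List String) : Decidable (Spec_nodouble words ignore out) := by unfold Spec_nodouble; infer_instance

-- ===== CLAIM (what is proved, stated in full; the proofs are below) =====
def Claim_equal_nodouble : Prop := ∀ (words : List String) (ignore : String), Dom_nodouble words ignore → Spec_nodouble words ignore (nodouble words ignore)

-- ===== LEMMAS AND PROOFS =====

-- "some adjacent pair a==b with b not ignored" as a standalone recursive predicate,
-- the bridge between A's fold and B's run decomposition
def hasAdj (ignore : List Char) : List Char → Bool
  | [] => false
  | [_] => false
  | a :: b :: t => (a == b && !ignore.contains b) || hasAdj ignore (b :: t)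

lemma foldl_step_true (ignore : List Char) (l : List Char) (x : Option Char) :
    l.foldl (nodoubleStep ignore) (x, true) = (x, true) := by
  induction l with
  | nil => rfl
  | cons c cs ih => simpa [nodoubleStep] using ih

lemma bad_eq_hasAdj (ignore : List Char) (l : List Char) (a : Char) :
    (l.foldl (nodoubleStep ignore) (some a, false)).2 = hasAdj ignore (a :: l) := by
  induction l generalizing a with
  | nil => rfl
  | cons b cs ih =>
    rw [List.foldl_cons]
    by_cases h : (a == b && !ignore.contains b) = true
    · simp only [nodoubleStep]
      rw [if_neg (by simp), if_pos (by simpa using h), foldl_step_true]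
      simp only [hasAdj]
      simp at h ⊢
      exact Or.inl h
    · simp only [nodoubleStep]
      rw [if_neg (by simp), if_neg (by simpa using h), ih b]
      have hf : (a == b && !ignore.contains b) = false := by simpa using h
      simp only [hasAdj, hf, Bool.false_or]

lemma word_bad_eq (ignore : List Char) (l : List Char) :
    (l.foldl (nodoubleStep ignore) (none, false)).2 = hasAdj ignore l := by
  cases l with
  | nil => rfl
  | cons a cs =>
    rw [List.foldl_cons]
    simp only [nodoubleStep]
    rw [if_neg (by simp), if_neg (by simp), bad_eq_hasAdj]

-- skipping a [c…c] prefix after a leading c: the whole run is bad iff the prefix is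
-- nonempty and c is not ignored, and the tail (starting past the run) contributes independently
lemma hasAdj_run (ignore : List Char) (c : Char) (pre rest : List Char)
    (hpre : ∀ x ∈ pre, x = c) (hrest : ∀ d, rest.head? = some d → d ≠ c) :
    hasAdj ignore (c :: (pre ++ rest))
      = (((!pre.isEmpty) && !ignore.contains c) || hasAdj ignore rest) := by
  induction pre with
  | nil =>
    simp only [List.nil_append, List.isEmpty_nil]
    cases rest with
    | nil => simp [hasAdj]
    | cons d t =>
      have hd : d ≠ c := hrest d rfl
      simp [hasAdj, (by simpa [eq_comm] using hd : ¬ c = d)]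
  | cons x pre' ih =>
    have hx : x = c := hpre x (by simp)
    subst hx
    have ih' := ih (fun y hy => hpre y (by simp [hy]))
    simp only [List.cons_append, hasAdj] at *
    rw [ih']
    cases decide (x ∈ ignore) <;> cases pre'.isEmpty <;> simp

lemma goodWord_eq (ignore : List Char) (l : List Char) :
    goodWord ignore l = !hasAdj ignore l := by
  induction l using runsOf.induct with
  | case1 => simp [goodWord, runsOf, hasAdj]
  | case2 c cs ih =>
    have hsplit : cs = cs.takeWhile (fun d => d == c) ++ cs.dropWhile (fun d => d == c) :=
      (List.takeWhile_append_dropWhile).symm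
    have hpre : ∀ x ∈ cs.takeWhile (fun d => d == c), x = c := by
      intro x hx
      simpa using List.mem_takeWhile_imp hx
    have hrest : ∀ d, (cs.dropWhile (fun d => d == c)).head? = some d → d ≠ c := by
      intro d hd
      have := List.head?_dropWhile_not (p := fun d => d == c) (l := cs)
      rw [hd] at this
      simpa using this
    conv_lhs => rw [goodWord]
    rw [runsOf]
    conv_rhs => rw [hsplit]
    rw [hasAdj_run ignore c _ _ hpre hrest]
    simp only [List.all_cons]
    rw [← goodWord, ih]
    have hlen : ((1 + (cs.takeWhile (fun d => d == c)).length == 1) : Bool)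
        = (cs.takeWhile (fun d => d == c)).isEmpty := by
      cases cs.takeWhile (fun d => d == c) <;> simp
    rw [hlen]
    cases (cs.takeWhile (fun d => d == c)).isEmpty <;>
      cases ignore.contains c <;>
      cases hasAdj ignore (cs.dropWhile (fun d => d == c)) <;> simp

lemma foldl_filter (p : String → Bool) (ws : List String) (acc : List String) :
    ws.foldl (fun acc w => if p w then acc ++ [w] else acc) acc
      = acc ++ ws.filter p := by
  induction ws generalizing acc with
  | nil => simp
  | cons w ws ih =>
    by_cases h : p w = true <;> simp [List.foldl, h, ih]

-- ===== VERDICT (by name: the statement is the Claim_ definition above) =====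
theorem nodouble_spec : Claim_equal_nodouble := by
  intro words ignore _
  unfold Spec_nodouble nodouble nodouble_alt
  have := foldl_filter (fun w => !(w.toList.foldl (nodoubleStep ignore.toList) (none, false)).2)
    words []
  simp only [this, List.nil_append]
  congr 1
  funext w
  rw [word_bad_eq, goodWord_eq]
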